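-- pv_equiv track=rewrite | github.com/achimdehnert/platform | apps/bfagent/apps/core/handlers/domains/bookwriting/generation.py | _parse_chapters
-- ===== SOURCE A (Python) =====
-- def _parse_chapters(response: str) -> list[dict]:
--     """Parse LLM response into chapter data."""
--     chapters = []
--     lines = response.split('\n')
--
--     current_chapter = None
--     current_section = None
--
--     for line in lines:
--         line = line.strip()
--
--         if line.startswith('## Chapter'):
--             if current_chapter:
--                 chapters.append(current_chapter)
--
--             # Extract title
--             parts = line.split(':', 1)
--             title = parts[1].strip() if len(parts) > 1 else line
--
--             current_chapter = {
--                 'title': title,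
--                 'summary': '',
--                 'outline': '',
--                 'notes': '',
--             }
--             current_section = None
--
--         elif line.startswith('**Summary:**'):
--             current_section = 'summary'
--             summary = line.replace('**Summary:**', '').strip()
--             if current_chapter and summary:
--                 current_chapter['summary'] = summary
--
--         elif line.startswith('**Key Events:**'):
--             current_section = 'outline'
--
--         elif line.startswith('-') and current_chapter:
--             event = line[1:].strip()
--             if current_section == 'outline':
--                 current_chapter['outline'] += f"- {event}\n"
--
--         elif line and current_chapter and current_section == 'summary':
--             current_chapter['summary'] += f" {line}"
--
--     if current_chapter:
--         chapters.append(current_chapter)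
--
--     return chapters
-- ===== SOURCE B (Python) =====
-- def _parse_chapters(response: str) -> list[dict]:
--     """Parse LLM response into chapter data (partition-then-map)."""
--     lines = [ln.strip() for ln in response.split('\n')]
--     while lines and not lines[0].startswith('## Chapter'):
--         lines.pop(0)
--     return [_parse_block(b) for b in _split_blocks(lines)]
--
--
-- def _split_blocks(lines):
--     if not lines:
--         return []
--     j = 1
--     while j < len(lines) and not lines[j].startswith('## Chapter'):
--         j += 1
--     return [lines[:j]] + _split_blocks(lines[j:])
--
--
-- def _parse_block(block):
--     header, body = block[0], block[1:]
--     parts = header.split(':', 1)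
--     title = parts[1].strip() if len(parts) > 1 else header
--     summary, outline, section = '', '', None
--     for line in body:
--         if line.startswith('**Summary:**'):
--             section = 'summary'
--             text = line.replace('**Summary:**', '').strip()
--             if text:
--                 summary = text
--         elif line.startswith('**Key Events:**'):
--             section = 'outline'
--         elif line.startswith('-'):
--             if section == 'outline':
--                 outline += f"- {line[1:].strip()}\n"
--         elif line and section == 'summary':
--             summary += f" {line}"
--     return {'title': title, 'summary': summary, 'outline': outline, 'notes': ''}
-- ===== Notes on version B (the rewrite author's own statement) =====
-- stated objective: alternative
-- what changed: A is one stateful pass threading an optional current-chapter dict and section flag through every line; B first partitions the stripped lines into per-chapter blocks (drop the preamble, split at '## Chapter' headers) and then maps a pure per-block parser over them with only local summary/outline/section state.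
import Mathlib
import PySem

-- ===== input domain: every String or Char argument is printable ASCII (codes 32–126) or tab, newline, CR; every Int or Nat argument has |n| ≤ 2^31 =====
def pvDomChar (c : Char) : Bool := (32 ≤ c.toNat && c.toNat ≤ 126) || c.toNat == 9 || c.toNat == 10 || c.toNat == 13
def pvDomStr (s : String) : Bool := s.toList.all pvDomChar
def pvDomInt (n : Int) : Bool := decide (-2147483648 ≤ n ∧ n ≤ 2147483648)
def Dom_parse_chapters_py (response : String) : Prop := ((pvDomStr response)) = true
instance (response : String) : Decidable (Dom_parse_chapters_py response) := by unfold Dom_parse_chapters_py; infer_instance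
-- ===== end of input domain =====

-- B replaces A's single stateful scan (optional current-chapter dict + section flag) by
-- partition-into-chapter-blocks then a pure per-block parser; same output, alternative decomposition.


-- ===== PORT A =====
-- title extraction: parts = line.split(':', 1); parts[1].strip() if len(parts) > 1 else line
def pvTitleA (line : String) : String :=
  let parts := (PySem.Str.splitMax? line ":" 1).getD []
  match parts[1]? with
  | some p => PySem.Str.strip p
  | none => line

-- A's loop body on the already-stripped line; state = (chapters, current_chapter, current_section)
def pvAStepS (st : List (PySem.Dict String String) × Option (PySem.Dict String String) × Option String)
    (line : String) :
    List (PySem.Dict String String) × Option (PySem.Dict String String) × Option String :=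
  match st with
  | (chapters, cur, sec) =>
    if PySem.Str.startswith line "## Chapter" then
      let chapters := match cur with
        | some c => if c.items.isEmpty then chapters else chapters ++ [c]   -- 'if current_chapter:' (dict truthiness)
        | none => chapters
      (chapters,
       some (PySem.Dict.mk [("title", pvTitleA line), ("summary", ""), ("outline", ""), ("notes", "")]),
       none)
    else if PySem.Str.startswith line "**Summary:**" then
      let summary := PySem.Str.strip (PySem.Str.replace line "**Summary:**" "")
      let cur := match cur with
        | some c => if !c.items.isEmpty && summary != "" then some (c.insert "summary" summary) else some c
        | none => none
      (chapters, cur, some "summary")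
    else if PySem.Str.startswith line "**Key Events:**" then
      (chapters, cur, some "outline")
    else
      match cur with
      | none => (chapters, none, sec)    -- both remaining elifs require current_chapter
      | some c =>
        if PySem.Str.startswith line "-" && !c.items.isEmpty then
          let event := PySem.Str.strip (PySem.Str.slice line (some 1) none)
          let c := if sec == some "outline" then
              c.insert "outline" (c.getD "outline" "" ++ "- " ++ event ++ "\n")
            else c
          (chapters, some c, sec)
        else if line != "" && !c.items.isEmpty && sec == some "summary" then
          (chapters, some (c.insert "summary" (c.getD "summary" "" ++ " " ++ line)), sec)
        else (chapters, some c, sec)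

-- 'line = line.strip()' at the top of A's loop body
def pvAStep (st : List (PySem.Dict String String) × Option (PySem.Dict String String) × Option String)
    (raw : String) :
    List (PySem.Dict String String) × Option (PySem.Dict String String) × Option String :=
  pvAStepS st (PySem.Str.strip raw)

-- trailing 'if current_chapter: chapters.append(current_chapter); return chapters'
def pvFinish (st : List (PySem.Dict String String) × Option (PySem.Dict String String) × Option String) :
    List (List (String × String)) :=
  (match st.2.1 with
   | some c => if c.items.isEmpty then st.1 else st.1 ++ [c]
   | none => st.1).map PySem.Dict.items

def parse_chapters_py (response : String) : List (List (String × String)) :=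
  let lines := (PySem.Str.split? response "\n").getD []     -- sep "\n" ≠ "": never none
  pvFinish (lines.foldl pvAStep ([], none, none))

-- ===== PORT B =====
def pvNotHeaderB (l : String) : Bool := !(PySem.Str.startswith l "## Chapter")

-- same title extraction, in _parse_block
def pvTitleB (line : String) : String :=
  let parts := (PySem.Str.splitMax? line ":" 1).getD []
  match parts[1]? with
  | some p => PySem.Str.strip p
  | none => line

-- body loop of _parse_block; state = (summary, outline, section)
def pvBodyStep (st : String × String × Option String) (line : String) : String × String × Option String :=
  match st with
  | (s, o, sec) =>
    if PySem.Str.startswith line "**Summary:**" then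
      let t := PySem.Str.strip (PySem.Str.replace line "**Summary:**" "")
      (if t != "" then t else s, o, some "summary")
    else if PySem.Str.startswith line "**Key Events:**" then
      (s, o, some "outline")
    else if PySem.Str.startswith line "-" then
      (s,
       if sec == some "outline" then
         o ++ "- " ++ PySem.Str.strip (PySem.Str.slice line (some 1) none) ++ "\n"
       else o,
       sec)
    else if line != "" && sec == some "summary" then
      (s ++ " " ++ line, o, sec)
    else (s, o, sec)

def pvParseBlock (block : List String) : List (String × String) :=
  match block with
  | [] => []          -- unreachable: blocks are nonempty
  | h :: body =>
    let r := body.foldl pvBodyStep ("", "", none)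
    [("title", pvTitleB h), ("summary", r.1), ("outline", r.2.1), ("notes", "")]

-- _split_blocks: first block = header plus following non-header lines, recurse on the rest
def pvSplitBlocks : List String → List (List String)
  | [] => []
  | h :: rest =>
    (h :: rest.takeWhile pvNotHeaderB) :: pvSplitBlocks (rest.dropWhile pvNotHeaderB)
termination_by l => l.length
decreasing_by simpa [Nat.lt_succ_iff] using List.length_dropWhile_le pvNotHeaderB rest

def parse_chapters_py_alt (response : String) : List (List (String × String)) :=
  let lines := ((PySem.Str.split? response "\n").getD []).map PySem.Str.strip
  let lines := lines.dropWhile pvNotHeaderB     -- the leading pop-loop: discard the preamble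
  (pvSplitBlocks lines).map pvParseBlock

-- ===== PRECONDITION & SPEC =====
def Spec_parse_chapters_py (response : String) (out : List (List (String × String))) : Prop := out = parse_chapters_py_alt response
instance (response : String) (out : List (List (String × String))) : Decidable (Spec_parse_chapters_py response out) := by unfold Spec_parse_chapters_py; infer_instance

-- ===== CLAIM (what is proved, stated in full; the proofs are below) =====
def Claim_equal_parse_chapters_py : Prop := ∀ (response : String), Dom_parse_chapters_py response → Spec_parse_chapters_py response (parse_chapters_py response)

-- ===== LEMMAS AND PROOFS =====
def pvMk (t s o : String) : PySem.Dict String String :=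
  PySem.Dict.mk [("title", t), ("summary", s), ("outline", o), ("notes", "")]

theorem pvTitle_eq : pvTitleB = pvTitleA := rfl

-- one A-step on a non-header line, with a live chapter, acts exactly as B's body step
theorem pvStep_body (l t s o : String) (sec : Option String)
    (acc : List (PySem.Dict String String)) (hl : pvNotHeaderB l = true) :
    pvAStepS (acc, some (pvMk t s o), sec) l =
      (acc, some (pvMk t (pvBodyStep (s, o, sec) l).1 (pvBodyStep (s, o, sec) l).2.1),
        (pvBodyStep (s, o, sec) l).2.2) := by
  simp only [pvNotHeaderB, Bool.not_eq_true'] at hl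
  unfold pvAStepS pvBodyStep
  simp only [hl, Bool.false_eq_true, if_false]
  split_ifs with h1 h2 h3 h4 <;>
    simp_all [pvMk] <;> rfl

-- one A-step on a header line flushes the current chapter and opens a fresh one
theorem pvStep_header_some (l t s o : String) (sec : Option String)
    (acc : List (PySem.Dict String String)) (hl : pvNotHeaderB l = false) :
    pvAStepS (acc, some (pvMk t s o), sec) l =
      (acc ++ [pvMk t s o], some (pvMk (pvTitleA l) "" ""), none) := by
  simp [pvNotHeaderB] at hl
  unfold pvAStepS
  simp [hl, pvMk]

theorem pvStep_header_none (l : String) (sec : Option String)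
    (acc : List (PySem.Dict String String)) (hl : pvNotHeaderB l = false) :
    pvAStepS (acc, none, sec) l = (acc, some (pvMk (pvTitleA l) "" ""), none) := by
  simp [pvNotHeaderB] at hl
  unfold pvAStepS
  simp [hl, pvMk]

-- before the first header, an A-step only (possibly) changes the section flag
theorem pvStep_pre (l : String) (sec : Option String) (acc : List (PySem.Dict String String))
    (hl : pvNotHeaderB l = true) :
    ∃ sec', pvAStepS (acc, none, sec) l = (acc, none, sec') := by
  simp only [pvNotHeaderB, Bool.not_eq_true'] at hl
  unfold pvAStepS
  simp only [hl, Bool.false_eq_true, if_false]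
  split_ifs <;> exact ⟨_, rfl⟩

-- main invariant: from a live chapter (t, s, o) A's remaining fold produces exactly the
-- current block finished with B's body loop, followed by B's parses of the remaining blocks
theorem pvMain (ls : List String) : ∀ (acc : List (PySem.Dict String String)) (t s o : String)
    (sec : Option String),
    pvFinish (ls.foldl pvAStepS (acc, some (pvMk t s o), sec)) =
      acc.map PySem.Dict.items
        ++ (pvMk t ((ls.takeWhile pvNotHeaderB).foldl pvBodyStep (s, o, sec)).1
              ((ls.takeWhile pvNotHeaderB).foldl pvBodyStep (s, o, sec)).2.1).items
          :: (pvSplitBlocks (ls.dropWhile pvNotHeaderB)).map pvParseBlock := by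
  induction ls with
  | nil => intro acc t s o sec; simp [pvFinish, pvMk, pvSplitBlocks]
  | cons l ls ih =>
    intro acc t s o sec
    by_cases hl : pvNotHeaderB l = true
    · rw [List.foldl_cons, pvStep_body l t s o sec acc hl, ih,
        List.takeWhile_cons_of_pos hl, List.dropWhile_cons_of_pos hl, List.foldl_cons]
    · rw [Bool.not_eq_true] at hl
      rw [List.foldl_cons, pvStep_header_some l t s o sec acc hl, ih,
        List.takeWhile_cons_of_neg (by simp [hl]), List.dropWhile_cons_of_neg (by simp [hl])]
      rw [pvSplitBlocks]
      simp [pvParseBlock, pvMk, pvTitle_eq]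

-- preamble: with no chapter open yet, A's fold yields exactly B's block parses
theorem pvTop (ls : List String) : ∀ (sec : Option String),
    pvFinish (ls.foldl pvAStepS ([], none, sec)) =
      (pvSplitBlocks (ls.dropWhile pvNotHeaderB)).map pvParseBlock := by
  induction ls with
  | nil => intro sec; simp [pvFinish, pvSplitBlocks]
  | cons l ls ih =>
    intro sec
    by_cases hl : pvNotHeaderB l = true
    · obtain ⟨sec', hstep⟩ := pvStep_pre l sec [] hl
      rw [List.foldl_cons, hstep, ih, List.dropWhile_cons_of_pos hl]
    · rw [Bool.not_eq_true] at hl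
      rw [List.foldl_cons, pvStep_header_none l sec [] hl,
        pvMain ls [] (pvTitleA l) "" "" none,
        List.dropWhile_cons_of_neg (by simp [hl]), pvSplitBlocks]
      simp [pvParseBlock, pvMk, pvTitle_eq]

-- ===== VERDICT (by name: the statement is the Claim_ definition above) =====
theorem parse_chapters_py_spec : Claim_equal_parse_chapters_py := by
  intro response _
  show parse_chapters_py response = parse_chapters_py_alt response
  have h : pvAStep = fun st raw => pvAStepS st (PySem.Str.strip raw) := rfl
  simp only [parse_chapters_py, parse_chapters_py_alt]
  rw [h, ← List.foldl_map]
  exact pvTop _ none
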